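-- pv_equiv track=rewrite | github.com/dascardonaca/TCC | pythonpasdfrog.py | cutn
-- ===== SOURCE A (Python) =====
-- def cutn(x, delim, n):
-- 	z=''
-- 	if n<=0:
-- 		return cut(x, delim)
-- 	for i in range (n):
-- 		for j in range(len(x)):
-- 			if x[j]!=delim:
-- 				i=i+1
-- 			else:
-- 				return cutn(x[i+1:], delim, n-1)
--
-- def cut(x, delim):
-- 	i=0
-- 	while i <len(x):
-- 		if x[i]!= delim:
-- 			i=i+1
-- 		else:
-- 			return x[:i]
-- 	return x
-- ===== SOURCE B (Python) =====
-- def cutn(x, delim, n):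
--     pos = [i for i, c in enumerate(x) if c == delim]
--     if n <= 0:
--         return x[:pos[0]] if pos else x
--     if len(pos) < n:
--         return None
--     start = pos[n - 1] + 1
--     end = pos[n] if n < len(pos) else len(x)
--     return x[start:end]
-- ===== Notes on version B (the rewrite author's own statement) =====
-- stated objective: faster
-- what changed: Replaces A's recursion with nested early-return loops by a single scan that collects all delimiter positions, then returns the field by direct index arithmetic on that table.
import Mathlib
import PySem

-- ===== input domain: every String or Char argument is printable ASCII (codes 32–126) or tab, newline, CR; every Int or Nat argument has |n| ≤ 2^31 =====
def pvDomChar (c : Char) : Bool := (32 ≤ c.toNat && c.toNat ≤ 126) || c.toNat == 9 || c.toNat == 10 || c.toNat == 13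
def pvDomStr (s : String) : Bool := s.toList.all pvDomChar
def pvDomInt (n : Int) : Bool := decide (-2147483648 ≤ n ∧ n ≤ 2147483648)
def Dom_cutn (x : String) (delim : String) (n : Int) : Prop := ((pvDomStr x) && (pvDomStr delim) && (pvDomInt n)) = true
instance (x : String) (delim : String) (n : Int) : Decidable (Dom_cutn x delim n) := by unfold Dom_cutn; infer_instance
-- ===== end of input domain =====

-- B replaces A's recursion-with-nested-loops by one scan building the delimiter-position table and direct indexing (measured faster: A's outer range(n) loop rescans x per iteration when no delimiter remains).

-- ===== PORT A =====
-- cut's while loop: i walks up; x[i] is a 1-char string compared with delim, so we compare [x[i]] with delim.toList;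
-- x[:i] with 0 ≤ i is List.take i (exact).
def cutGo (x d : List Char) (i : Nat) : List Char :=
  if h : i < x.length then
    if [x[i]] ≠ d then cutGo x d (i + 1)
    else x.take i
  else x
termination_by x.length - i

def cutCh (x d : List Char) : List Char := cutGo x d 0

-- inner 'for j in range(len(x))' loop of cutn: accumulator i is incremented on non-delim chars;
-- returns 'some i' for the early return, 'none' when the loop falls through.
def innerFind (x d : List Char) (i j : Nat) : Option Nat :=
  if h : j < x.length then
    if [x[j]] ≠ d then innerFind x d (i + 1) (j + 1)
    else some i
  else none
termination_by x.length - j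

-- outer 'for i in range(n)' loop: runs the inner loop for each i; yields the i of the first early return (if any).
def outerFind (x d : List Char) (ks : List Nat) : Option Nat :=
  match ks with
  | [] => none
  | i :: rest =>
    match innerFind x d i 0 with
    | some i' => some i'
    | none => outerFind x d rest

-- x[i+1:] with 0 ≤ i+1 is List.drop (i+1) (exact; Python clamps past the end exactly like drop).
def cutnCh (x d : List Char) (n : Int) : Option (List Char) :=
  if n ≤ 0 then some (cutCh x d)
  else
    match outerFind x d (List.range n.toNat) with
    | some i' => cutnCh (x.drop (i' + 1)) d (n - 1)
    | none => none
termination_by n.toNat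
decreasing_by
  rename_i h1
  omega

def cutn (x : String) (delim : String) (n : Int) : Option String :=
  (cutnCh x.toList delim.toList n).map (fun l => String.ofList l)

-- ===== PORT B =====
-- the comprehension [i for i, c in enumerate(x) if c == delim]: an index counter carried down the list;
-- c == delim compares the 1-char string with delim, i.e. [c] = d.
def positions (x d : List Char) (i : Nat) : List Nat :=
  match x with
  | [] => []
  | c :: rest => if [c] = d then i :: positions rest d (i + 1) else positions rest d (i + 1)

-- pos[n-1] and pos[n] are read with getD; both indices are in range where they are reached, so getD is exact.
-- x[start:end] with 0 ≤ start ≤ end is (drop start).take (end - start) (exact).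
def cutnAltCh (x d : List Char) (n : Int) : Option (List Char) :=
  let pos := positions x d 0
  if n ≤ 0 then
    some (match pos with | [] => x | p :: _ => x.take p)
  else if (pos.length : Int) < n then none
  else
    let start := pos.getD (n - 1).toNat 0 + 1
    let stop := if n < (pos.length : Int) then pos.getD n.toNat 0 else x.length
    some ((x.drop start).take (stop - start))

def cutn_alt (x : String) (delim : String) (n : Int) : Option String :=
  (cutnAltCh x.toList delim.toList n).map (fun l => String.ofList l)

-- ===== PRECONDITION & SPEC =====
def Spec_cutn (x : String) (delim : String) (n : Int) (out : Option String) : Prop := out = cutn_alt x delim n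
instance (x : String) (delim : String) (n : Int) (out : Option String) : Decidable (Spec_cutn x delim n out) := by unfold Spec_cutn; infer_instance

-- ===== CLAIM (what is proved, stated in full; the proofs are below) =====
def Claim_equal_cutn : Prop := ∀ (x : String) (delim : String) (n : Int), Dom_cutn x delim n → Spec_cutn x delim n (cutn x delim n)

-- ===== LEMMAS AND PROOFS =====

theorem positions_shift (x d : List Char) (i : Nat) :
    positions x d i = (positions x d 0).map (· + i) := by
  induction x generalizing i with
  | nil => simp [positions]
  | cons c rest ih =>
    simp only [positions]
    by_cases hc : [c] = d
    · simp [hc, ih (i+1), ih 1, Function.comp, Nat.add_comm, Nat.add_left_comm]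
    · simp [hc, ih (i+1), ih 1, Function.comp, Nat.add_comm, Nat.add_left_comm]

-- decomposition of the position table at its head
theorem positions_head (x d : List Char) (p : Nat) (rest : List Nat)
    (h : positions x d 0 = p :: rest) :
    p < x.length ∧ rest = (positions (x.drop (p + 1)) d 0).map (· + (p + 1)) := by
  induction x generalizing p rest with
  | nil => simp [positions] at h
  | cons c xs ih =>
    simp only [positions] at h
    by_cases hc : [c] = d
    · simp only [hc] at h
      obtain ⟨hp, hr⟩ := List.cons.injEq .. ▸ h
      subst hp
      refine ⟨by simp, ?_⟩
      rw [← hr, positions_shift xs d 1]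
      simp
    · rw [if_neg hc, positions_shift xs d 1] at h
      rcases List.map_eq_cons_iff.mp h with ⟨q, rest', hq, hqp, hrest⟩
      have hp : p = q + 1 := hqp.symm
      obtain ⟨hlt, hr⟩ := ih q rest' hq
      subst hp
      constructor
      · simpa using Nat.succ_lt_succ hlt
      · rw [← hrest, hr]
        simp only [List.map_map]
        have : xs.drop (q + 1) = (c :: xs).drop (q + 1 + 1) := by simp
        rw [← this]
        apply List.map_congr_left
        intro a _
        simp [Function.comp]
        omega

-- the inner for-loop returns i + (head of the position table of the unscanned suffix)
theorem innerFind_eq (x d : List Char) (i j : Nat) :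
    innerFind x d i j = (positions (x.drop j) d 0).head?.map (i + ·) := by
  fun_induction innerFind x d i j with
  | case1 i j h hne ih =>
    rw [ih]
    have hx : x.drop j = x[j] :: x.drop (j+1) := List.drop_eq_getElem_cons h
    rw [hx]
    simp only [positions, if_neg hne]
    rw [positions_shift (x.drop (j+1)) d 1]
    cases hh : (positions (x.drop (j+1)) d 0) with
    | nil => simp
    | cons a l => simp [Nat.add_comm, Nat.add_left_comm]
  | case2 i j h hne =>
    have hx : x.drop j = x[j] :: x.drop (j+1) := List.drop_eq_getElem_cons h
    have hd : [x[j]] = d := not_not.mp hne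
    rw [hx]
    simp [positions, hd]
  | case3 i j h =>
    have : x.drop j = [] := List.drop_eq_nil_of_le (by omega)
    simp [this, positions]

-- the while loop of cut returns the prefix before the head of the position table
theorem cutGo_eq (x d : List Char) (j : Nat) :
    cutGo x d j = match (positions (x.drop j) d 0).head? with
                  | some k => x.take (j + k)
                  | none => x := by
  fun_induction cutGo x d j with
  | case1 j h hne ih =>
    rw [ih]
    have hx : x.drop j = x[j] :: x.drop (j+1) := List.drop_eq_getElem_cons h
    rw [hx]
    simp only [positions, if_neg hne]
    rw [positions_shift (x.drop (j+1)) d 1]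
    cases hh : (positions (x.drop (j+1)) d 0) with
    | nil => simp
    | cons a l => simp [Nat.add_comm, Nat.add_left_comm]
  | case2 j h hne =>
    have hx : x.drop j = x[j] :: x.drop (j+1) := List.drop_eq_getElem_cons h
    have hd : [x[j]] = d := not_not.mp hne
    rw [hx]
    simp [positions, hd]
  | case3 j h =>
    have : x.drop j = [] := List.drop_eq_nil_of_le (by omega)
    simp [this, positions]

theorem outerFind_none (x d : List Char) (ks : List Nat)
    (h : positions x d 0 = []) : outerFind x d ks = none := by
  induction ks with
  | nil => rfl
  | cons i rest ih =>
    simp only [outerFind, innerFind_eq, List.drop_zero, h]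
    simpa using ih

-- B's recurrence: dropping past the first delimiter and decrementing n preserves B's value (n ≥ 1)
theorem altCh_step (x d : List Char) (n : Int) (p : Nat) (rest : List Nat)
    (hn : 1 ≤ n) (h : positions x d 0 = p :: rest) :
    cutnAltCh x d n = cutnAltCh (x.drop (p + 1)) d (n - 1) := by
  obtain ⟨hplt, hrest⟩ := positions_head x d p rest h
  set x' := x.drop (p + 1) with hx'
  have hlenx' : x'.length = x.length - (p + 1) := by simp [hx']
  set pos' := positions x' d 0 with hpos'
  have hlr : rest.length = pos'.length := by rw [hrest]; simp
  have hgetD : ∀ k, k < pos'.length → rest.getD k 0 = pos'.getD k 0 + (p + 1) := by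
    intro k hk
    rw [hrest, List.getD_eq_getElem _ _ (by simpa using hk), List.getD_eq_getElem _ _ hk]
    simp
  simp only [cutnAltCh, h, ← hpos']
  rw [if_neg (show ¬ n ≤ 0 by omega)]
  by_cases h1 : n = 1
  · subst h1
    rw [if_neg (show ¬ ((p :: rest).length : Int) < 1 by
          simp only [List.length_cons]; push_cast; omega)]
    rw [if_pos (show (1:Int) - 1 ≤ 0 by norm_num)]
    cases hp' : pos' with
    | nil =>
      rw [hp'] at hrest
      simp only [List.map_nil] at hrest
      subst hrest
      rw [show ((1:Int) - 1).toNat = 0 from rfl]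
      rw [if_neg (show ¬ (1:Int) < (([p] : List Nat).length : Int) by norm_num)]
      simp only [List.getD_cons_zero, ← hlenx', hx']
      simp
    | cons q l =>
      rw [hp'] at hrest
      simp only [List.map_cons] at hrest
      subst hrest
      rw [show ((1:Int) - 1).toNat = 0 from rfl, show (Int.toNat 1) = 1 from rfl]
      rw [if_pos (show (1:Int) < ((p :: (q + (p + 1)) :: List.map (fun x => x + (p + 1)) l).length : Int) by
            simp only [List.length_cons]; push_cast; omega)]
      simp only [List.getD_cons_zero, List.getD_cons_succ, hx']
      rw [show q + (p + 1) - (p + 1) = q from by omega]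
  · have hn2 : 2 ≤ n := by omega
    rw [if_neg (show ¬ n - 1 ≤ 0 by omega)]
    have hlc : ((p :: rest).length : Int) < n ↔ ((pos'.length : Int)) < n - 1 := by
      simp only [List.length_cons, hlr]
      omega
    by_cases hshort : ((p :: rest).length : Int) < n
    · rw [if_pos hshort, if_pos (hlc.mp hshort)]
    · rw [if_neg hshort, if_neg (fun hc => hshort (hlc.mpr hc))]
      have hplen : (n - 1).toNat ≤ pos'.length := by
        simp only [List.length_cons, hlr] at hshort
        omega
      have hk1 : (n - 1).toNat = (n - 2).toNat + 1 := by omega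
      have hidx1 : (n - 2).toNat < pos'.length := by omega
      have hstart : (p :: rest).getD (n - 1).toNat 0 = pos'.getD (n - 2).toNat 0 + (p + 1) := by
        rw [hk1, List.getD_cons_succ, hgetD _ hidx1]
      have hk2 : (n - 1 - 1).toNat = (n - 2).toNat := by omega
      rw [hstart, hk2]
      set s' := pos'.getD (n - 2).toNat 0 with hs'
      have hdropeq : x.drop (s' + (p + 1) + 1) = x'.drop (s' + 1) := by
        rw [hx', List.drop_drop]
        congr 1
        omega
      rw [hdropeq]
      congr 1
      have hcond : n < ((p :: rest).length : Int) ↔ n - 1 < ((pos'.length : Int)) := by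
        simp only [List.length_cons, hlr]
        omega
      by_cases hmore : n < ((p :: rest).length : Int)
      · rw [if_pos hmore, if_pos (hcond.mp hmore)]
        have hkn : n.toNat = (n - 1).toNat + 1 := by omega
        have hidx2 : (n - 1).toNat < pos'.length := by
          simp only [List.length_cons, hlr] at hmore
          omega
        rw [hkn, List.getD_cons_succ, hgetD _ hidx2]
        congr 1
        omega
      · rw [if_neg hmore, if_neg (fun hc => hmore (hcond.mpr hc))]
        rw [hlenx']
        congr 1
        omega

theorem cutnCh_eq_alt (m : Nat) : ∀ (x d : List Char) (n : Int), n.toNat = m →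
    cutnCh x d n = cutnAltCh x d n := by
  induction m with
  | zero =>
    intro x d n hm
    have hn : n ≤ 0 := by omega
    rw [cutnCh, if_pos hn]
    simp only [cutnAltCh, if_pos hn]
    rw [cutCh, cutGo_eq]
    cases hp : positions x d 0 with
    | nil => simp [hp]
    | cons p rest => simp [hp]
  | succ m ih =>
    intro x d n hm
    have hn : 1 ≤ n := by omega
    rw [cutnCh, if_neg (by omega)]
    cases hp : positions x d 0 with
    | nil =>
      rw [outerFind_none x d _ hp]
      have h0 : (((positions x d 0).length : Int)) < n := by rw [hp]; simpa using hn
      simp only [cutnAltCh, if_neg (by omega : ¬ n ≤ 0), if_pos h0]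
    | cons p rest =>
      have hfirst : outerFind x d (List.range n.toNat) = some p := by
        have hr : List.range n.toNat = 0 :: (List.range m).map (· + 1) := by
          rw [hm, List.range_succ_eq_map]
        rw [hr, outerFind, innerFind_eq]
        simp [hp]
      rw [hfirst]
      show cutnCh (List.drop (p + 1) x) d (n - 1) = cutnAltCh x d n
      rw [ih (x.drop (p+1)) d (n-1) (by omega)]
      exact (altCh_step x d n p rest hn hp).symm

-- ===== VERDICT (by name: the statement is the Claim_ definition above) =====
theorem cutn_spec : Claim_equal_cutn := by
  intro x delim n _
  unfold Spec_cutn cutn cutn_alt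
  rw [cutnCh_eq_alt n.toNat x.toList delim.toList n rfl]
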